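-- pv_equiv track=rewrite | github.com/mch90/StreamLit | clustering_wsa_0_5.py | gen_repeating
-- ===== SOURCE A (Python) =====
-- def gen_repeating(s):
--     """Generator: groups repeated elements in an iterable
--     E.g.
--         'abbccc' -> [('a', 0, 0), ('b', 1, 2), ('c', 3, 5)]
--     """
--     i = 0
--     while i < len(s):
--         j = i
--         while j < len(s) and s[j] == s[i]:
--             j += 1
--         yield (s[i], i, j-1)
--         i = j
-- ===== SOURCE B (Python) =====
-- def gen_repeating(s):
--     """Single forward pass comparing each element to its predecessor;
--     a run boundary is emitted whenever s[idx] != s[idx-1]."""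
--     start = 0
--     for idx in range(1, len(s)):
--         if s[idx] != s[idx - 1]:
--             yield (s[start], start, idx - 1)
--             start = idx
--     if len(s) > 0:
--         yield (s[start], start, len(s) - 1)
-- ===== Notes on version B (the rewrite author's own statement) =====
-- stated objective: simpler
-- what changed: Replaced A's nested while-loops (inner scan comparing each element to the run's first element) by a single adjacent-comparison pass that emits a run whenever the current element differs from its predecessor.
import Mathlib
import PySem

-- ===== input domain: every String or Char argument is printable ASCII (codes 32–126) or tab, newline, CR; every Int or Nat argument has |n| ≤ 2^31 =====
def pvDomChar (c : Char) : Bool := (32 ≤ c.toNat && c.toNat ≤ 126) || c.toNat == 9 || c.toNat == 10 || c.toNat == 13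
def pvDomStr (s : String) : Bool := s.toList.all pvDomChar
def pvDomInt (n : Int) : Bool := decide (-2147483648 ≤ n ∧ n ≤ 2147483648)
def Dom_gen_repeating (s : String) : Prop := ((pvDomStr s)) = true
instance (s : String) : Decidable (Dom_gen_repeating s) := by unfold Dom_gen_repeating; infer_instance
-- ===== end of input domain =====

-- B keeps A's semantics but uses one adjacent-comparison pass instead of nested scans.

-- ===== PORT A =====
-- inner while loop: 'while j < len(s) and s[j] == s[i]: j += 1' (c is the fixed s[i])
def pvInner (cs : List Char) (c : Char) (j : Nat) : Nat :=
  if _h : j < cs.length then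
    if cs[j]! = c then pvInner cs c (j + 1) else j
  else j
termination_by cs.length - j

-- needed by pvOuter's termination proof
lemma pvInner_ge_aux (cs : List Char) (c : Char) :
    ∀ (n j : Nat), cs.length - j ≤ n → j ≤ pvInner cs c j := by
  intro n
  induction n with
  | zero =>
    intro j h
    unfold pvInner
    split
    · next hj => omega
    · exact Nat.le_refl j
  | succ n ih =>
    intro j h
    unfold pvInner
    split
    · next hj =>
      split
      · have := ih (j + 1) (by omega)
        omega
      · exact Nat.le_refl j
    · exact Nat.le_refl j

lemma pvInner_step (cs : List Char) (i : Nat) (h : i < cs.length) :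
    pvInner cs (cs[i]!) i = pvInner cs (cs[i]!) (i + 1) := by
  conv_lhs => rw [pvInner]
  simp [h]

lemma pvInner_gt (cs : List Char) (i : Nat) (h : i < cs.length) :
    i < pvInner cs (cs[i]!) i := by
  rw [pvInner_step cs i h]
  have := pvInner_ge_aux cs (cs[i]!) (cs.length - (i + 1)) (i + 1) (Nat.le_refl _)
  omega

-- outer while loop of A
def pvOuter (cs : List Char) (i : Nat) : List (String × Int × Int) :=
  if h : i < cs.length then
    let j := pvInner cs (cs[i]!) i
    (String.mk [cs[i]!], (i : Int), (j : Int) - 1) :: pvOuter cs j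
  else []
termination_by cs.length - i
decreasing_by
  have := pvInner_gt cs i h
  omega

def gen_repeating (s : String) : List (String × Int × Int) :=
  pvOuter s.toList 0

-- ===== PORT B =====
-- 'for idx in range(1, len(s)): if s[idx] != s[idx-1]: yield (...); start = idx' then final run
def pvAltGo (cs : List Char) (start idx : Nat) : List (String × Int × Int) :=
  if _h : idx < cs.length then
    if cs[idx]! ≠ cs[idx - 1]! then
      (String.mk [cs[start]!], (start : Int), (idx : Int) - 1) :: pvAltGo cs idx (idx + 1)
    else pvAltGo cs start (idx + 1)
  else if 0 < cs.length then
    [(String.mk [cs[start]!], (start : Int), (cs.length : Int) - 1)]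
  else []
termination_by cs.length - idx

def gen_repeating_alt (s : String) : List (String × Int × Int) :=
  pvAltGo s.toList 0 1

-- ===== PRECONDITION & SPEC =====
def Spec_gen_repeating (s : String) (out : List (String × Int × Int)) : Prop := out = gen_repeating_alt s
instance (s : String) (out : List (String × Int × Int)) : Decidable (Spec_gen_repeating s out) := by unfold Spec_gen_repeating; infer_instance

-- ===== CLAIM (what is proved, stated in full; the proofs are below) =====
def Claim_equal_gen_repeating : Prop := ∀ (s : String), Dom_gen_repeating s → Spec_gen_repeating s (gen_repeating s)

-- ===== LEMMAS AND PROOFS =====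

-- While B is still scanning inside the run that started at i (so cs[j-1] = cs[i]),
-- it produces exactly the run A's inner scan finds, followed by the rest.
lemma pvScan (cs : List Char) (i : Nat) (hi : i < cs.length)
    (IH : ∀ i', i < i' → i' < cs.length → pvOuter cs i' = pvAltGo cs i' (i' + 1)) :
    ∀ (n j : Nat), cs.length - j ≤ n → i < j → j ≤ cs.length → cs[j - 1]! = cs[i]! →
      pvAltGo cs i j =
        (String.mk [cs[i]!], (i : Int), ((pvInner cs (cs[i]!) j : Nat) : Int) - 1)
          :: pvOuter cs (pvInner cs (cs[i]!) j) := by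
  intro n
  induction n with
  | zero =>
    intro j h1 h2 h3 h4
    have hj : j = cs.length := by omega
    subst hj
    have hne : cs ≠ [] := by intro hc; subst hc; simp at hi
    rw [pvAltGo, pvInner, pvOuter]
    simp [hi, hne]
  | succ n ih =>
    intro j h1 h2 h3 h4
    by_cases hj : j < cs.length
    · by_cases he : cs[j]! = cs[j - 1]!
      · -- still inside the run
        have hji : cs[j]! = cs[i]! := he.trans h4
        have hInner : pvInner cs (cs[i]!) j = pvInner cs (cs[i]!) (j + 1) := by
          conv_lhs => rw [pvInner]
          rw [dif_pos hj, if_pos hji]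
        rw [pvAltGo]
        simp only [hj, dif_pos, he, ne_eq, not_true_eq_false, if_false]
        rw [hInner]
        exact ih (j + 1) (by omega) (by omega) (by omega) (by simpa using hji)
      · -- run boundary
        have hji : cs[j]! ≠ cs[i]! := fun hc => he (hc.trans h4.symm)
        have hInner : pvInner cs (cs[i]!) j = j := by
          rw [pvInner]
          rw [dif_pos hj, if_neg hji]
        rw [pvAltGo]
        simp only [hj, dif_pos, he, ne_eq, not_false_eq_true, if_true]
        rw [hInner, IH j h2 hj]
    · have hj' : j = cs.length := by omega
      subst hj'
      have hne : cs ≠ [] := by intro hc; subst hc; simp at hi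
      rw [pvAltGo, pvInner, pvOuter]
      simp [hi, hne]

lemma pvMain (cs : List Char) :
    ∀ (n i : Nat), cs.length - i ≤ n → i < cs.length → pvOuter cs i = pvAltGo cs i (i + 1) := by
  intro n
  induction n with
  | zero => intro i h hi; omega
  | succ n ih =>
    intro i h hi
    have IH : ∀ i', i < i' → i' < cs.length → pvOuter cs i' = pvAltGo cs i' (i' + 1) := by
      intro i' hii hi'
      exact ih i' (by omega) hi'
    rw [pvOuter]
    simp only [hi, dif_pos]
    rw [pvScan cs i hi IH (cs.length - (i + 1)) (i + 1) (Nat.le_refl _) (by omega) (by omega)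
      (by simp)]
    rw [pvInner_step cs i hi]

-- ===== VERDICT (by name: the statement is the Claim_ definition above) =====
theorem gen_repeating_spec : Claim_equal_gen_repeating := by
  intro s _
  unfold Spec_gen_repeating gen_repeating gen_repeating_alt
  by_cases h : 0 < s.toList.length
  · exact pvMain s.toList s.toList.length 0 (by omega) h
  · rw [pvOuter, pvAltGo]
    simp at h
    simp [h]
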